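-- pv_equiv track=rewrite | github.com/victorcmoura/eda2-2017-2 | Greedy Algorithms/selectingBreakpoints.py | truck_driver_algorithm
-- ===== SOURCE A (Python) =====
-- def binary_search(values, searched_value):
--     first = 0
--     last = len(values) - 1
--     found = False
--
--     while first <= last and not found:
--         midpoint = (first + last)//2
--
--         if values[midpoint] == searched_value:
--             found = True
--         else:
--             if searched_value < values[midpoint]:
--                 last = midpoint - 1
--             elif searched_value > values[midpoint]:
--                 first = midpoint + 1
--
--     return midpoint
--
-- def binary_search_for_truck_driver(values, searched_value):
--     result = binary_search(values, searched_value)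
--
--     # if it is not the first break point
--     if result != 0:
--         # if the result is bigger than the searched value, it becomes the previous break point
--         if values[result] > searched_value:
--             result = result - 1
--
--     return result
--
-- def truck_driver_algorithm(break_points, fuel_capacity):
--     solution = []
--     current_location = 0
--
--     while current_location != break_points[-1]:
--         index = binary_search_for_truck_driver(break_points, current_location + fuel_capacity)
--
--         if current_location == break_points[index]:
--             return {'solution':solution}
--
--         current_location = break_points[index]
--         solution.append(break_points[index])
--     return {'solution':solution}
-- ===== SOURCE B (Python) =====
-- def truck_driver_algorithm(break_points, fuel_capacity):
--     # Same greedy refuelling walk; the stop lookup is a value-returning bounded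
--     # recursion with the step-back adjustment folded into its base cases
--     # (no found flag, no index post-adjustment pass).
--     def next_stop(lo, hi, value):
--         mid = (lo + hi) // 2
--         here = break_points[mid]
--         if value < here:
--             if lo < mid:
--                 return next_stop(lo, mid - 1, value)
--             # search bottomed out above value: step back, except at the first point
--             return break_points[mid - 1] if mid != 0 else break_points[0]
--         if value > here:
--             if mid < hi:
--                 return next_stop(mid + 1, hi, value)
--             return here
--         return here
--
--     last_point = break_points[-1]
--     solution = []
--     current_location = 0
--     while current_location != last_point:
--         nxt = next_stop(0, len(break_points) - 1, current_location + fuel_capacity)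
--         if nxt == current_location:
--             break
--         solution.append(nxt)
--         current_location = nxt
--     return {'solution': solution}
-- ===== Notes on version B (the rewrite author's own statement) =====
-- stated objective: alternative
-- what changed: A's iterative binary search with a found flag plus a separate index post-adjustment helper is replaced by one value-returning recursion on the interval that folds the step-back adjustment into its base cases, removing the found-flag state machine, the index indirection and the second indexing pass.
import Mathlib
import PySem

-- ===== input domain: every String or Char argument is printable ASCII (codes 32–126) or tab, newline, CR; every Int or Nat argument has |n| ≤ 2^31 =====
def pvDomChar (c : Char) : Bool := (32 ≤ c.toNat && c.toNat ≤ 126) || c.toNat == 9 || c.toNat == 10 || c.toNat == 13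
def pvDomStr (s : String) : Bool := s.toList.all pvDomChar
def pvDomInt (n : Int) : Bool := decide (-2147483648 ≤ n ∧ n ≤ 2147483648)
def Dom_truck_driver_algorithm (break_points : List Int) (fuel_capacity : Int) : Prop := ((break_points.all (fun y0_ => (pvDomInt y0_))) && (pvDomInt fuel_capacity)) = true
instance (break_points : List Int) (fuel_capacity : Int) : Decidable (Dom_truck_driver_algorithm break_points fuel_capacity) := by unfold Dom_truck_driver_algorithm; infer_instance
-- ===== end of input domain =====

-- B restructures A's stop lookup (iterative binary search with a found flag plus an index
-- post-adjustment pass) into one value-returning bounded recursion with the adjustment folded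
-- into its base cases; same cost, different decomposition (objective: alternative).

-- ===== PORT A =====
-- the while loop of binary_search: state (first, last, midpoint); fuel only makes the
-- recursion total (the interval shrinks each step, so values.length + 1 iterations always
-- suffice; the 0 branch is unreachable on the real calls).  'found = True' makes the very
-- next loop test fail and the function return the just-set midpoint, so that branch returns m.
def bsLoop (values : List Int) (searched_value : Int) (first last midpoint : Int) : Nat → Int
  | 0 => midpoint
  | fuel+1 =>
    if first ≤ last then
      let m := PySem.Int.floordiv (first + last) 2
      let x := (PySem.List.pyGet? values m).getD 0   -- values[midpoint]; in range on every real call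
      if x = searched_value then m
      else if searched_value < x then bsLoop values searched_value first (m - 1) m fuel
      else bsLoop values searched_value (m + 1) last m fuel   -- searched_value > values[midpoint]
    else midpoint

-- midpoint starts at 0: Python leaves it unbound, which is only read when the list is empty
-- (excluded by Pre_, Python raises earlier at break_points[-1])
def binary_search (values : List Int) (searched_value : Int) : Int :=
  bsLoop values searched_value 0 ((values.length : Int) - 1) 0 (values.length + 1)

def binary_search_for_truck_driver (values : List Int) (searched_value : Int) : Int :=
  let result := binary_search values searched_value
  if result ≠ 0 then
    if (PySem.List.pyGet? values result).getD 0 > searched_value then result - 1 else result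
  else result

-- the outer while loop; fuel break_points.length + 2 covers every terminating Python run
-- (a run that returns never repeats a current_location, so it makes at most length + 1 passes)
def tdLoop (break_points : List Int) (fuel_capacity : Int) (solution : List Int) (current_location : Int) : Nat → List Int
  | 0 => solution
  | fuel+1 =>
    if current_location ≠ (PySem.List.pyGet? break_points (-1)).getD 0 then
      let index := binary_search_for_truck_driver break_points (current_location + fuel_capacity)
      let x := (PySem.List.pyGet? break_points index).getD 0
      if current_location = x then solution
      else tdLoop break_points fuel_capacity (solution ++ [x]) x fuel
    else solution

def truck_driver_algorithm (break_points : List Int) (fuel_capacity : Int) : List (String × List Int) :=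
  [("solution", tdLoop break_points fuel_capacity [] 0 (break_points.length + 2))]

-- ===== PORT B =====
-- Source B's next_stop: value-returning recursion on the interval [lo, hi]; same total fuel
def altLocate (break_points : List Int) (value : Int) (lo hi : Int) : Nat → Int
  | 0 => 0
  | fuel+1 =>
    let mid := PySem.Int.floordiv (lo + hi) 2
    let here := (PySem.List.pyGet? break_points mid).getD 0
    if value < here then
      if lo < mid then altLocate break_points value lo (mid - 1) fuel
      else if mid ≠ 0 then (PySem.List.pyGet? break_points (mid - 1)).getD 0
      else (PySem.List.pyGet? break_points 0).getD 0
    else if value > here then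
      if mid < hi then altLocate break_points value (mid + 1) hi fuel
      else here
    else here

-- Source B's while loop, with last_point computed once before it
def altLoop (break_points : List Int) (fuel_capacity last_point current_location : Int) : Nat → List Int
  | 0 => []
  | fuel+1 =>
    if current_location ≠ last_point then
      let nxt := altLocate break_points (current_location + fuel_capacity) 0 ((break_points.length : Int) - 1) (break_points.length + 1)
      if nxt = current_location then []
      else nxt :: altLoop break_points fuel_capacity last_point nxt fuel
    else []

def truck_driver_algorithm_alt (break_points : List Int) (fuel_capacity : Int) : List (String × List Int) :=
  [("solution", altLoop break_points fuel_capacity ((PySem.List.pyGet? break_points (-1)).getD 0) 0 (break_points.length + 2))]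

-- ===== PRECONDITION & SPEC =====
-- Pre_ excludes only the empty list, on which A raises IndexError at break_points[-1]
def Pre_truck_driver_algorithm (break_points : List Int) (fuel_capacity : Int) : Prop :=
  break_points ≠ []
instance (break_points : List Int) (fuel_capacity : Int) : Decidable (Pre_truck_driver_algorithm break_points fuel_capacity) := by
  unfold Pre_truck_driver_algorithm; infer_instance

def pvWitness_truck_driver_algorithm : List Int × Int := ([0, 5, 10], 5)

def Spec_truck_driver_algorithm (break_points : List Int) (fuel_capacity : Int) (out : List (String × List Int)) : Prop := out = truck_driver_algorithm_alt break_points fuel_capacity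
instance (break_points : List Int) (fuel_capacity : Int) (out : List (String × List Int)) : Decidable (Spec_truck_driver_algorithm break_points fuel_capacity out) := by unfold Spec_truck_driver_algorithm; infer_instance

-- ===== CLAIM (what is proved, stated in full; the proofs are below) =====
def Claim_equal_truck_driver_algorithm : Prop := ∀ (break_points : List Int) (fuel_capacity : Int), Dom_truck_driver_algorithm break_points fuel_capacity → Pre_truck_driver_algorithm break_points fuel_capacity → Spec_truck_driver_algorithm break_points fuel_capacity (truck_driver_algorithm break_points fuel_capacity)

-- ===== LEMMAS AND PROOFS =====

-- the break-point value A moves to, given the raw binary-search index (A's adjustment pass)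
def bsAdjVal (break_points : List Int) (v i : Int) : Int :=
  (PySem.List.pyGet? break_points
    (if i ≠ 0 then
      (if (PySem.List.pyGet? break_points i).getD 0 > v then i - 1 else i)
     else i)).getD 0

-- core: on any interval lo ≤ hi (any list contents), B's recursion returns exactly the
-- break point A reads after its binary search plus adjustment, for any carried midpoint
lemma altLocate_eq_bs (break_points : List Int) (v : Int) :
    ∀ (fuel : Nat) (lo hi : Int), lo ≤ hi → (hi + 1 - lo).toNat < fuel →
    ∀ mid0 : Int,
      altLocate break_points v lo hi fuel
        = bsAdjVal break_points v (bsLoop break_points v lo hi mid0 fuel) := by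
  intro fuel
  induction fuel with
  | zero => intro lo hi _ hf _; omega
  | succ k ih =>
    intro lo hi hle hf mid0
    obtain ⟨hml, hmr⟩ := PySem.Int.floordiv_two_mid_bounds (lo := lo) (hi := hi) hle
    simp only [altLocate, bsLoop, if_pos hle]
    set m := PySem.Int.floordiv (lo + hi) 2 with hm
    set x := (PySem.List.pyGet? break_points m).getD 0 with hx
    rcases lt_trichotomy v x with hvx | hvx | hvx
    · -- searched value below values[mid]
      rw [if_pos hvx, if_neg (by omega : ¬ x = v), if_pos hvx]
      by_cases hlm : lo < m
      · rw [if_pos hlm, ih lo (m - 1) (by omega) (by omega) m]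
      · rw [if_neg hlm]
        have hk : ∃ k', k = k' + 1 := ⟨k - 1, by omega⟩
        obtain ⟨k', rfl⟩ := hk
        have hmlo : m = lo := by omega
        rw [show bsLoop break_points v lo (m - 1) m (k' + 1) = m by
              simp only [bsLoop]; rw [if_neg (by omega)]]
        by_cases hm0 : m = 0
        · simp [bsAdjVal, hm0]
        · simp only [bsAdjVal, if_pos (by omega : m ≠ 0), ← hx, if_pos hvx]
    · -- searched value equals values[mid]
      rw [if_neg (by omega : ¬ v < x), if_neg (by omega : ¬ v > x), if_pos (by omega : x = v)]
      simp only [bsAdjVal]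
      by_cases hm0 : m = 0
      · simp [hm0, hx]
      · rw [if_pos hm0, if_neg (by omega : ¬ (PySem.List.pyGet? break_points m).getD 0 > v)]
    · -- searched value above values[mid]
      rw [if_neg (by omega : ¬ v < x), if_pos hvx, if_neg (by omega : ¬ x = v),
          if_neg (by omega : ¬ v < x)]
      by_cases hmh : m < hi
      · rw [if_pos hmh, ih (m + 1) hi (by omega) (by omega) m]
      · rw [if_neg hmh]
        have hk : ∃ k', k = k' + 1 := ⟨k - 1, by omega⟩
        obtain ⟨k', rfl⟩ := hk
        rw [show bsLoop break_points v (m + 1) hi m (k' + 1) = m by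
              simp only [bsLoop]; rw [if_neg (by omega)]]
        simp only [bsAdjVal]
        by_cases hm0 : m = 0
        · simp [hm0, hx]
        · rw [if_pos hm0, if_neg (by omega : ¬ (PySem.List.pyGet? break_points m).getD 0 > v)]

-- the value A jumps to each outer step equals B's next_stop
lemma step_val_eq (break_points : List Int) (h : break_points ≠ []) (v : Int) :
    (PySem.List.pyGet? break_points (binary_search_for_truck_driver break_points v)).getD 0
      = altLocate break_points v 0 ((break_points.length : Int) - 1) (break_points.length + 1) := by
  have hn : 1 ≤ break_points.length := List.length_pos_iff.mpr h
  rw [altLocate_eq_bs break_points v (break_points.length + 1) 0 ((break_points.length : Int) - 1)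
        (by omega) (by omega) 0]
  simp only [binary_search_for_truck_driver, binary_search, bsAdjVal]

-- the outer loops agree, the accumulator vs cons-built output related by append
lemma loop_eq (break_points : List Int) (fuel_capacity : Int) (h : break_points ≠ []) :
    ∀ (fuel : Nat) (sol : List Int) (cur : Int),
      tdLoop break_points fuel_capacity sol cur fuel
        = sol ++ altLoop break_points fuel_capacity
            ((PySem.List.pyGet? break_points (-1)).getD 0) cur fuel := by
  intro fuel
  induction fuel with
  | zero => intro sol cur; simp [tdLoop, altLoop]
  | succ k ih =>
    intro sol cur
    simp only [tdLoop, altLoop]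
    by_cases hc : cur ≠ (PySem.List.pyGet? break_points (-1)).getD 0
    · rw [if_pos hc, if_pos hc, ← step_val_eq break_points h (cur + fuel_capacity)]
      set x := (PySem.List.pyGet? break_points
        (binary_search_for_truck_driver break_points (cur + fuel_capacity))).getD 0 with hxdef
      by_cases hcx : cur = x
      · rw [if_pos hcx, if_pos hcx.symm]; simp
      · rw [if_neg hcx, if_neg (fun hh => hcx hh.symm), ih (sol ++ [x]) x]
        simp
    · rw [if_neg hc, if_neg hc]; simp

-- ===== VERDICT (by name: the statement is the Claim_ definition above) =====
theorem truck_driver_algorithm_spec : Claim_equal_truck_driver_algorithm := by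
  intro break_points fuel_capacity _ hpre
  unfold Spec_truck_driver_algorithm truck_driver_algorithm truck_driver_algorithm_alt
  rw [loop_eq break_points fuel_capacity hpre]
  simp
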